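-- pv_equiv track=rewrite | github.com/kaeul1020/Algorithm | 프로그래머스/1/64061. 크레인 인형뽑기 게임/크레인 인형뽑기 게임.py | solution
-- ===== SOURCE A (Python) =====
-- def solution(board, moves):
--     answer, n = 0, len(board)
--     stacks, basket = [], []
--
--     # 재정렬
--     for i in range(n):
--         stacks.append([])
--         for j in range(n):
--             if board[j][i] != 0 :
--                 stacks[i].insert(0, board[j][i])
--
--     # 옮기기
--     for i, m in enumerate(moves):
--         try :
--             basket.append(stacks[m-1].pop())
--         except :
--             continue
--
--         while len(basket) >= 2 and (basket[-2] == basket[-1]) :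
--             answer += 2
--             basket.pop()
--             basket.pop()
--
--     return answer
-- ===== SOURCE B (Python) =====
-- def solution(board, moves):
--     # Lazy per-column top pointers instead of pre-building column stacks;
--     # the board argument is never mutated.
--     n = len(board)
--     top = [0] * n
--     basket = []
--     answer = 0
--     for m in moves:
--         c = m - 1
--         try:
--             t = top[c]
--         except IndexError:
--             continue
--         while t < n and board[t][c] == 0:
--             t += 1
--         if t < n:
--             basket.append(board[t][c])
--             t += 1
--             while len(basket) >= 2 and basket[-2] == basket[-1]:
--                 answer += 2
--                 basket.pop()
--                 basket.pop()
--         top[c] = t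
--     return answer
-- ===== Notes on version B (the rewrite author's own statement) =====
-- stated objective: faster
-- what changed: B replaces A's eager pre-building of all n column stacks (repeated list.insert(0,..) plus a pop-side copy) by a lazy per-column top-pointer array that skips zeros on demand and never copies or mutates the board.
-- outside the precondition, e.g. on solution([[1, 2, 2], [4, 2, 6]], [0, 0]): A returns 2, B returns 0
import Mathlib
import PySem

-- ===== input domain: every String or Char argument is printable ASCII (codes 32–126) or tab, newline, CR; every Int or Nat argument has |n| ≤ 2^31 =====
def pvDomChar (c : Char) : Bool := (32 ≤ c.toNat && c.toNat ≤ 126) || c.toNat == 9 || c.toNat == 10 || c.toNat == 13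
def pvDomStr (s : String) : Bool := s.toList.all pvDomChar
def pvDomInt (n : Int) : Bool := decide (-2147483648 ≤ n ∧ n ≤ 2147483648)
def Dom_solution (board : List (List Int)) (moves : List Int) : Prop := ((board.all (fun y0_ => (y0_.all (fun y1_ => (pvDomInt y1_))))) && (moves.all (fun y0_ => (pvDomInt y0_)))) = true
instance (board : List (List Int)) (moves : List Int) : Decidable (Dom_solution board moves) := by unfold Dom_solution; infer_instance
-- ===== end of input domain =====

-- B replaces A's eager pre-building of every column stack by a lazy per-column
-- top-pointer array that skips zeros on demand (board is never mutated by either).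


-- ===== PORT A =====
-- the inner `while len(basket)>=2 and basket[-2]==basket[-1]` loop, identical in both Pythons
def popPairs (answer : Int) (basket : List Int) : Int × List Int :=
  if h : 2 ≤ basket.length ∧
      PySem.List.pyGetD basket (-2) 0 = PySem.List.pyGetD basket (-1) 0 then
    popPairs (answer + 2) basket.dropLast.dropLast
  else (answer, basket)
termination_by basket.length
decreasing_by simp [List.length_dropLast]; omega

-- the `재정렬` double loop of A: stks[i] built by insert(0, board[j][i]) over j
def buildStacks (board : List (List Int)) (n : Int) : List (List Int) :=
  (PySem.List.pyRange 0 n 1).foldl (fun stks i =>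
    stks ++ [(PySem.List.pyRange 0 n 1).foldl (fun s j =>
      if PySem.List.pyGetD (PySem.List.pyGetD board j []) i 0 ≠ 0 then
        PySem.List.pyGetD (PySem.List.pyGetD board j []) i 0 :: s
      else s) []]) []

-- one iteration of A's moves loop (try stks[m-1].pop() / except continue, then popPairs)
def stepA (st : Int × List (List Int) × List Int) (m : Int) : Int × List (List Int) × List Int :=
  match PySem.List.pyGet? st.2.1 (m - 1) with
  | none => st                       -- IndexError on stks[m-1] → continue
  | some col =>
    match col.getLast? with
    | none => st                     -- IndexError on .pop() from empty → continue
    | some v =>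
      let stks := PySem.List.pySetD st.2.1 (m - 1) col.dropLast
      let basket := st.2.2 ++ [v]
      let (answer, basket) := popPairs st.1 basket
      (answer, stks, basket)

def solution (board : List (List Int)) (moves : List Int) : Int :=
  let n := PySem.List.len board
  (moves.foldl stepA (0, buildStacks board n, [])).1

-- ===== PORT B =====
-- B's `while t < n and board[t][c] == 0: t += 1`
def scanB (board : List (List Int)) (n c t : Int) : Int :=
  if h : t < n ∧ PySem.List.pyGetD (PySem.List.pyGetD board t []) c 0 = 0 then
    scanB board n c (t + 1)
  else t
termination_by (n - t).toNat
decreasing_by omega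

-- one iteration of B's moves loop (try top[c] / except continue, scan, take, write back)
def stepB (board : List (List Int)) (n : Int) (st : Int × List Int × List Int) (m : Int) :
    Int × List Int × List Int :=
  let c := m - 1
  match PySem.List.pyGet? st.2.1 c with
  | none => st                       -- IndexError on top[c] → continue
  | some t0 =>
    let t := scanB board n c t0
    if t < n then
      let basket := st.2.2 ++ [PySem.List.pyGetD (PySem.List.pyGetD board t []) c 0]
      let t := t + 1
      let (answer, basket) := popPairs st.1 basket
      (answer, PySem.List.pySetD st.2.1 c t, basket)
    else
      (st.1, PySem.List.pySetD st.2.1 c t, st.2.2)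

def solution_alt (board : List (List Int)) (moves : List Int) : Int :=
  let n := PySem.List.len board
  (moves.foldl (stepB board n) (0, List.replicate board.length 0, [])).1

-- ===== PRECONDITION & SPEC =====
-- Pre_ restricts to square boards, the task's natural n×n domain: A raises IndexError when a
-- row is shorter than len(board), and on rows longer than len(board) A silently ignores the
-- extra columns while negative moves wrap differently — an artefact of its stack pre-build.
def Pre_solution (board : List (List Int)) (_moves : List Int) : Prop :=
  ∀ row ∈ board, row.length = board.length
instance (board : List (List Int)) (_moves : List Int) : Decidable (Pre_solution board _moves) := by
  unfold Pre_solution; infer_instance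

def pvWitness_solution : List (List Int) × List Int := ([[1, 0], [2, 2]], [1, 2, 1])

def Spec_solution (board : List (List Int)) (moves : List Int) (out : Int) : Prop := out = solution_alt board moves
instance (board : List (List Int)) (moves : List Int) (out : Int) : Decidable (Spec_solution board moves out) := by unfold Spec_solution; infer_instance

-- ===== CLAIM (what is proved, stated in full; the proofs are below) =====
def Claim_equal_solution : Prop := ∀ (board : List (List Int)) (moves : List Int), Dom_solution board moves → Pre_solution board moves → Spec_solution board moves (solution board moves)

-- ===== LEMMAS AND PROOFS =====

-- the still-unconsumed nonzero entries of column k, from row t downward (top first)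
def colNZ (board : List (List Int)) (k t : Nat) : List Int :=
  ((board.drop t).map (fun row => row.getD k 0)).filter (fun v => decide (v ≠ 0))

-- the column entry of column k at row t
def entry (board : List (List Int)) (k t : Nat) : Int := (board.getD t []).getD k 0

-- Python's normalised index for an in-range i on a list of length n
def pyNorm (n : Nat) (i : Int) : Nat := if i < 0 then (i + n).toNat else i.toNat

-- the simulation invariant between A's stacks and B's top pointers
def SimInv (board : List (List Int)) (stks : List (List Int)) (top : List Int) : Prop :=
  stks.length = board.length ∧ top.length = board.length ∧
  ∀ k, k < board.length →
    ∃ t : Nat, t ≤ board.length ∧ top[k]? = some (t : Int) ∧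
      stks[k]? = some (colNZ board k t).reverse

theorem pyNorm_lt {n : Nat} {i : Int} (h : PySem.Raise.InRange n i) : pyNorm n i < n := by
  unfold PySem.Raise.InRange at h
  unfold pyNorm; split <;> omega

theorem pyGet?_norm {α : Type} (xs : List α) (i : Int) (h : PySem.Raise.InRange xs.length i) :
    PySem.List.pyGet? xs i = xs[pyNorm xs.length i]? := by
  unfold PySem.Raise.InRange at h
  unfold pyNorm; split
  · rw [show i = -(((-i).toNat : Nat) : Int) by omega,
      PySem.List.pyGet?_neg_natCast xs (-i).toNat (by omega) (by omega)]
    congr 1; omega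
  · rw [PySem.List.pyGet?_of_nonneg xs (by omega)]

theorem pySetD_norm {α : Type} (xs : List α) (i : Int) (v : α)
    (h : PySem.Raise.InRange xs.length i) :
    PySem.List.pySetD xs i v = xs.set (pyNorm xs.length i) v := by
  unfold PySem.Raise.InRange at h
  unfold PySem.List.pySetD PySem.List.pySet? PySem.List.pyIdx? pyNorm
  by_cases hi : 0 ≤ i
  · simp only [if_pos hi, if_pos h.2, Option.map_some, Option.getD_some]
    rw [if_neg (by omega)]
  · simp only [if_neg hi, if_pos h.1, Option.map_some, Option.getD_some]
    rw [if_pos (by omega)]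
    congr 1; omega

-- A's inner build loop is a reversed filter
theorem foldl_consif {ι : Type} (g : ι → Int) (l : List ι) (s0 : List Int) :
    l.foldl (fun s j => if g j ≠ 0 then g j :: s else s) s0
      = ((l.map g).filter (fun v => decide (v ≠ 0))).reverse ++ s0 := by
  induction l generalizing s0 with
  | nil => simp
  | cons a l ih =>
    simp only [List.foldl_cons, List.map_cons, List.filter_cons, ih]
    by_cases ha : g a ≠ 0 <;> simp [ha]

theorem map_range_getD {α β : Type} (f : α → β) (d : α) (xs : List α) :
    (List.range xs.length).map (fun j => f (xs.getD j d)) = xs.map f := by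
  induction xs with
  | nil => simp
  | cons a t ih =>
    simp only [List.length_cons, List.range_succ_eq_map, List.map_cons, List.map_map]
    simpa using ih

theorem buildStacks_eq (board : List (List Int)) :
    buildStacks board (PySem.List.len board)
      = (List.range board.length).map (fun k => (colNZ board k 0).reverse) := by
  unfold buildStacks
  rw [PySem.List.len_eq, PySem.List.pyRange_zero_nat,
    PySem.List.foldl_append_singleton_eq_map, List.nil_append, List.map_map]
  refine List.map_congr_left ?_
  intro k _
  simp only [Function.comp]
  rw [List.foldl_map,
    foldl_consif (fun j : Nat => PySem.List.pyGetD (PySem.List.pyGetD board (j : Int) []) (k : Int) 0)]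
  simp only [PySem.List.pyGetD_natCast, List.append_nil]
  rw [map_range_getD (fun row => row.getD k 0) [] board]
  unfold colNZ
  simp

theorem colNZ_succ (board : List (List Int)) (k t : Nat) (ht : t < board.length) :
    colNZ board k t =
      if entry board k t ≠ 0 then entry board k t :: colNZ board k (t + 1)
      else colNZ board k (t + 1) := by
  unfold colNZ entry
  rw [List.drop_eq_getElem_cons ht, List.map_cons, List.filter_cons,
    List.getD_eq_getElem board [] ht]
  by_cases h : board[t].getD k 0 ≠ 0
  · rw [if_pos h, if_pos (by simpa using h)]
  · rw [if_neg h, if_neg (by simpa using h)]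

theorem colNZ_length_eq_nil (board : List (List Int)) (k : Nat) :
    colNZ board k board.length = [] := by
  unfold colNZ; simp

theorem entry_pyGetD (board : List (List Int))
    (hsq : ∀ row ∈ board, row.length = board.length)
    (t : Nat) (ht : t < board.length) (c : Int)
    (hc : PySem.Raise.InRange board.length c) :
    PySem.List.pyGetD (PySem.List.pyGetD board (t : Int) []) c 0
      = entry board (pyNorm board.length c) t := by
  have hrow : (board.getD t []).length = board.length := by
    rw [List.getD_eq_getElem board [] ht]
    exact hsq _ (List.getElem_mem ht)
  unfold PySem.Raise.InRange at hc
  unfold entry pyNorm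
  rw [PySem.List.pyGetD_natCast]
  split
  · rw [show c = -(((-c).toNat : Nat) : Int) by omega,
      PySem.List.pyGetD_neg_natCast _ _ _ (by omega) (by rw [hrow]; omega),
      List.getD_eq_getElem _ 0 (by rw [hrow]; omega)]
    congr 1
    rw [hrow]; omega
  · rw [PySem.List.pyGetD_eq_getElem _ _ (by omega) (by rw [hrow]; omega),
      List.getD_eq_getElem _ 0 (by rw [hrow]; omega)]

theorem scanB_spec (board : List (List Int))
    (hsq : ∀ row ∈ board, row.length = board.length) (c : Int)
    (hc : PySem.Raise.InRange board.length c) :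
    ∀ t : Nat, t ≤ board.length →
      ∃ t' : Nat, scanB board (board.length : Int) c (t : Int) = (t' : Int) ∧
        t ≤ t' ∧ t' ≤ board.length ∧
        colNZ board (pyNorm board.length c) t = colNZ board (pyNorm board.length c) t' ∧
        (t' = board.length ∨ entry board (pyNorm board.length c) t' ≠ 0) := by
  intro t ht
  induction hfuel : board.length - t generalizing t with
  | zero =>
    have htn : t = board.length := by omega
    refine ⟨t, ?_, le_refl t, by omega, rfl, Or.inl htn⟩
    rw [scanB, dif_neg (by omega)]
  | succ f ih =>
    have htn : t < board.length := by omega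
    rw [scanB]
    by_cases hz : entry board (pyNorm board.length c) t = 0
    · rw [dif_pos ⟨by omega, by rw [entry_pyGetD board hsq t htn c hc]; exact hz⟩]
      obtain ⟨t', h1, h2, h3, h4, h5⟩ := ih (t + 1) (by omega) (by omega)
      push_cast at h1
      refine ⟨t', by exact_mod_cast h1, by omega, h3, ?_, h5⟩
      rw [colNZ_succ board _ t htn, if_neg (by simpa using hz)]
      exact h4
    · rw [dif_neg (by
        rintro ⟨_, hcontra⟩
        rw [entry_pyGetD board hsq t htn c hc] at hcontra
        exact hz hcontra)]
      exact ⟨t, rfl, le_refl t, by omega, rfl, Or.inr hz⟩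

theorem step_sim (board : List (List Int))
    (hsq : ∀ row ∈ board, row.length = board.length)
    (ans : Int) (bk : List Int) (stks : List (List Int)) (top : List Int) (m : Int)
    (hInv : SimInv board stks top) :
    (stepA (ans, stks, bk) m).1 = (stepB board (board.length : Int) (ans, top, bk) m).1 ∧
    (stepA (ans, stks, bk) m).2.2 = (stepB board (board.length : Int) (ans, top, bk) m).2.2 ∧
    SimInv board (stepA (ans, stks, bk) m).2.1
      (stepB board (board.length : Int) (ans, top, bk) m).2.1 := by
  obtain ⟨hls, hlt, hk⟩ := hInv
  by_cases hr : PySem.Raise.InRange board.length (m - 1)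
  case neg =>
    have ha : PySem.List.pyGet? stks (m - 1) = none := by
      rw [PySem.List.pyGet?_eq_none_iff, hls]; exact hr
    have hb : PySem.List.pyGet? top (m - 1) = none := by
      rw [PySem.List.pyGet?_eq_none_iff, hlt]; exact hr
    unfold stepA stepB
    refine ⟨by simp only [ha, hb], by simp only [ha, hb], ?_⟩
    simp only [ha, hb]
    exact ⟨hls, hlt, hk⟩
  case pos =>
    have hklt : pyNorm board.length (m - 1) < board.length := pyNorm_lt hr
    set k := pyNorm board.length (m - 1) with hkdef
    obtain ⟨t, htle, htop, hstk⟩ := hk k hklt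
    have hgA : PySem.List.pyGet? stks (m - 1) = some (colNZ board k t).reverse := by
      rw [pyGet?_norm stks (m - 1) (by rw [hls]; exact hr),
        show pyNorm stks.length (m - 1) = k by rw [hls]]
      exact hstk
    have hgB : PySem.List.pyGet? top (m - 1) = some (t : Int) := by
      rw [pyGet?_norm top (m - 1) (by rw [hlt]; exact hr),
        show pyNorm top.length (m - 1) = k by rw [hlt]]
      exact htop
    have hsetA : ∀ col, PySem.List.pySetD stks (m - 1) col = stks.set k col := by
      intro col
      rw [pySetD_norm stks (m - 1) col (by rw [hls]; exact hr),
        show pyNorm stks.length (m - 1) = k by rw [hls]]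
    have hsetB : ∀ v, PySem.List.pySetD top (m - 1) v = top.set k v := by
      intro v
      rw [pySetD_norm top (m - 1) v (by rw [hlt]; exact hr),
        show pyNorm top.length (m - 1) = k by rw [hlt]]
    obtain ⟨t', hscan, htt', ht'le, hcol, hend⟩ := scanB_spec board hsq (m - 1) hr t htle
    unfold stepA stepB
    simp only [hgA, hgB, hscan]
    rcases hcase : colNZ board k t with _ | ⟨v, rest⟩
    · -- empty column: A pops from empty (except: continue), B's scan runs to n
      have ht'n : t' = board.length := by
        rcases hend with h | h
        · exact h
        · by_contra hne
          have hlt' : t' < board.length := by omega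
          rw [hcase, colNZ_succ board k t' hlt', if_pos h] at hcol
          exact List.cons_ne_nil _ _ hcol.symm
      simp only [List.reverse_nil, List.getLast?_nil]
      rw [if_neg (by omega), hsetB]
      refine ⟨rfl, rfl, by simpa using hls, by simpa using hlt, ?_⟩
      intro j hj
      by_cases hjk : j = k
      · subst hjk
        refine ⟨t', by omega, ?_, ?_⟩
        · rw [List.getElem?_set_self (by omega), ht'n]
        · rw [hstk, hcol]
      · obtain ⟨tj, h1, h2, h3⟩ := hk j hj
        exact ⟨tj, h1, by rw [List.getElem?_set_ne (fun h => hjk h.symm)]; exact h2, h3⟩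
    · -- nonempty column: A pops v, B takes board[t'][c] = v
      have ht'lt : t' < board.length := by
        by_contra hge
        have : t' = board.length := by omega
        rw [hcase, this, colNZ_length_eq_nil] at hcol
        exact List.cons_ne_nil _ _ hcol
      have hentry : entry board k t' ≠ 0 := by
        rcases hend with h | h
        · omega
        · exact h
      have hsplit : entry board k t' = v ∧ colNZ board k (t' + 1) = rest := by
        have := hcol
        rw [colNZ_succ board k t' ht'lt, if_pos hentry] at this
        rw [hcase] at this
        exact ⟨(List.cons.injEq _ _ _ _ ▸ this).1.symm, (List.cons.injEq _ _ _ _ ▸ this).2.symm⟩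
      simp only [List.reverse_cons, List.getLast?_concat]
      rw [if_pos (by exact_mod_cast ht'lt), List.dropLast_concat,
        entry_pyGetD board hsq t' ht'lt (m - 1) hr, ← hkdef, hsplit.1, hsetA, hsetB]
      refine ⟨rfl, rfl, by simpa using hls, by simpa using hlt, ?_⟩
      intro j hj
      by_cases hjk : j = k
      · subst hjk
        refine ⟨t' + 1, by omega, ?_, ?_⟩
        · rw [List.getElem?_set_self (by omega)]
          push_cast
          rfl
        · rw [List.getElem?_set_self (by omega), hsplit.2]
      · obtain ⟨tj, h1, h2, h3⟩ := hk j hj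
        exact ⟨tj, h1, by rw [List.getElem?_set_ne (fun h => hjk h.symm)]; exact h2,
          by rw [List.getElem?_set_ne (fun h => hjk h.symm)]; exact h3⟩

theorem fold_sim (board : List (List Int))
    (hsq : ∀ row ∈ board, row.length = board.length) :
    ∀ (moves : List Int) (ans : Int) (bk : List Int) (stks : List (List Int)) (top : List Int),
      SimInv board stks top →
      (moves.foldl stepA (ans, stks, bk)).1
        = (moves.foldl (stepB board (board.length : Int)) (ans, top, bk)).1 := by
  intro moves
  induction moves with
  | nil => intro ans bk stks top _; rfl
  | cons m moves ih =>
    intro ans bk stks top hInv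
    obtain ⟨h1, h2, h3⟩ := step_sim board hsq ans bk stks top m hInv
    simp only [List.foldl_cons]
    rcases hA : stepA (ans, stks, bk) m with ⟨a1, s1, b1⟩
    rcases hB : stepB board (board.length : Int) (ans, top, bk) m with ⟨a2, t1, b2⟩
    rw [hA, hB] at h1 h2 h3
    simp only at h1 h2 h3
    rw [h1, h2]
    exact ih a2 b2 s1 t1 h3

theorem simInv_init (board : List (List Int)) :
    SimInv board (buildStacks board (PySem.List.len board)) (List.replicate board.length 0) := by
  rw [buildStacks_eq]
  refine ⟨by simp, by simp, ?_⟩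
  intro j hj
  refine ⟨0, by omega, ?_, ?_⟩
  · rw [List.getElem?_replicate_of_lt hj]; rfl
  · rw [List.getElem?_map, List.getElem?_range hj]; rfl

-- ===== VERDICT (by name: the statement is the Claim_ definition above) =====
theorem solution_spec : Claim_equal_solution := by
  intro board moves _ hsq
  unfold Spec_solution solution solution_alt
  have h := fold_sim board hsq moves 0 [] (buildStacks board (PySem.List.len board))
    (List.replicate board.length 0) (simInv_init board)
  simpa [PySem.List.len_eq] using h
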